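-- pv_equiv track=rewrite | github.com/Zongheng00/ViDove | src/Pigeon.py | split_script
-- ===== SOURCE A (Python) =====
-- def split_script(script_in, chunk_size=1000):
--     script_split = script_in.split('\n\n')
--     script_arr = []
--     range_arr = []
--     start = 1
--     end = 0
--     script = ""
--     for sentence in script_split:
--         if len(script) + len(sentence) + 1 <= chunk_size:
--             script += sentence + '\n\n'
--             end += 1
--         else:
--             range_arr.append((start, end))
--             start = end + 1
--             end += 1
--             script_arr.append(script.strip())
--             script = sentence + '\n\n'
--     if script.strip():
--         script_arr.append(script.strip())
--         range_arr.append((start, len(script_split) - 1))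
--
--     assert len(script_arr) == len(range_arr)
--     return script_arr, range_arr
-- ===== SOURCE B (Python) =====
-- def split_script(script_in, chunk_size=1000):
--     # Pass 1: greedily partition the split sentences into groups.
--     sentences = script_in.split('\n\n')
--     groups = []
--     cur = []
--     cur_len = 0
--     for s in sentences:
--         if cur_len + len(s) + 1 <= chunk_size:
--             cur.append(s)
--             cur_len += len(s) + 2
--         else:
--             groups.append(cur)
--             cur = [s]
--             cur_len = len(s) + 2
--     # Pass 2: format each closed group and compute its index range.
--     script_arr = []
--     range_arr = []
--     c = 0
--     for g in groups:
--         script_arr.append('\n\n'.join(g).strip())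
--         range_arr.append((c + 1, c + len(g)))
--         c += len(g)
--     last = '\n\n'.join(cur).strip()
--     if last:
--         script_arr.append(last)
--         range_arr.append((c + 1, len(sentences) - 1))
--     return script_arr, range_arr
-- ===== Notes on version B (the rewrite author's own statement) =====
-- stated objective: alternative
-- what changed: A's single interleaved loop (accumulating the chunk string, ranges and counters together) is split into two passes: a greedy partition of the split sentences into index groups, then a formatting pass that joins/strips each group and derives its range from cumulative group sizes.
import Mathlib
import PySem

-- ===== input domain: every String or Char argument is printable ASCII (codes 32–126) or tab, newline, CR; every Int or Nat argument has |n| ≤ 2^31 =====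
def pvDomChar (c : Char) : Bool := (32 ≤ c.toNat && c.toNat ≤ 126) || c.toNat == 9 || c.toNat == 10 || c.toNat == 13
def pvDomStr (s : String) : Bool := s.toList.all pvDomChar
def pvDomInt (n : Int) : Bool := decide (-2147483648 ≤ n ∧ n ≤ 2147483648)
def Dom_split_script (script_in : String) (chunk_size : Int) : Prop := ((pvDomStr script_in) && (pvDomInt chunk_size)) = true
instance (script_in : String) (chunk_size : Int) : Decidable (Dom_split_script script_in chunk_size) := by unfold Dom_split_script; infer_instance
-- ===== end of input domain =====

-- B separates A's single interleaved loop into two passes — greedy grouping of the split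
-- sentences, then per-group formatting and range computation — same return value (simpler decomposition).

-- the '\n\n' separator, shared literal
def pvNl : List Char := ['\n', '\n']

-- ===== PORT A =====
-- A's loop body: state (script_arr, range_arr, start, end, script); strings kept as List Char.
def ssA_step (chunk_size : Int)
    (st : List (List Char) × List (Int × Int) × Int × Int × List Char) (sentence : List Char) :
    List (List Char) × List (Int × Int) × Int × Int × List Char :=
  match st with
  | (arr, ranges, start, e, script) =>
    if (script.length : Int) + (sentence.length : Int) + 1 ≤ chunk_size then
      (arr, ranges, start, e + 1, script ++ (sentence ++ pvNl))
    else
      (arr ++ [PySem.Chars.strip script], ranges ++ [(start, e)], e + 1, e + 1, sentence ++ pvNl)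

def split_script (script_in : String) (chunk_size : Int) : List String × (List (Int × Int)) :=
  let script_split := PySem.Chars.splitOn script_in.toList pvNl
  match script_split.foldl (ssA_step chunk_size) ([], [], 1, 0, []) with
  | (arr, ranges, start, _e, script) =>
    let fin := PySem.Chars.strip script
    if fin ≠ [] then
      ((arr ++ [fin]).map String.ofList, ranges ++ [(start, (script_split.length : Int) - 1)])
    else
      (arr.map String.ofList, ranges)

-- ===== PORT B =====
-- B pass 1: greedy partition of the sentences into groups (state: groups, cur, cur_len).
def ssB_group (chunk_size : Int)
    (st : List (List (List Char)) × List (List Char) × Int) (s : List Char) :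
    List (List (List Char)) × List (List Char) × Int :=
  match st with
  | (groups, cur, curlen) =>
    if curlen + (s.length : Int) + 1 ≤ chunk_size then
      (groups, cur ++ [s], curlen + (s.length : Int) + 2)
    else
      (groups ++ [cur], [s], (s.length : Int) + 2)

-- B pass 2: format one closed group and record its range (state: script_arr, range_arr, c).
def ssB_emit (st : List (List Char) × List (Int × Int) × Int) (g : List (List Char)) :
    List (List Char) × List (Int × Int) × Int :=
  match st with
  | (arr, ranges, c) =>
    (arr ++ [PySem.Chars.strip (PySem.Chars.join pvNl g)],
     ranges ++ [(c + 1, c + (g.length : Int))], c + (g.length : Int))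

def split_script_alt (script_in : String) (chunk_size : Int) : List String × (List (Int × Int)) :=
  let sentences := PySem.Chars.splitOn script_in.toList pvNl
  match sentences.foldl (ssB_group chunk_size) ([], [], 0) with
  | (groups, cur, _) =>
    match groups.foldl ssB_emit ([], [], 0) with
    | (arr, ranges, c) =>
      let last := PySem.Chars.strip (PySem.Chars.join pvNl cur)
      if last ≠ [] then
        ((arr ++ [last]).map String.ofList, ranges ++ [(c + 1, (sentences.length : Int) - 1)])
      else
        (arr.map String.ofList, ranges)

-- ===== PRECONDITION & SPEC =====
def Spec_split_script (script_in : String) (chunk_size : Int) (out : List String × (List (Int × Int))) : Prop := out = split_script_alt script_in chunk_size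
instance (script_in : String) (chunk_size : Int) (out : List String × (List (Int × Int))) : Decidable (Spec_split_script script_in chunk_size out) := by unfold Spec_split_script; infer_instance

-- ===== CLAIM (what is proved, stated in full; the proofs are below) =====
def Claim_equal_split_script : Prop := ∀ (script_in : String) (chunk_size : Int), Dom_split_script script_in chunk_size → Spec_split_script script_in chunk_size (split_script script_in chunk_size)

-- ===== LEMMAS AND PROOFS =====

-- A's accumulated `script` for the current group: every sentence followed by '\n\n'.
def pvGlue (g : List (List Char)) : List Char := (g.map (fun s => s ++ pvNl)).flatten

-- total sentence count of the closed groups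
def pvCnt (gs : List (List (List Char))) : Int := ((gs.map List.length).sum : Nat)

-- the ranges A has recorded for closed groups, starting at cumulative count c
def pvRng (c : Int) : List (List (List Char)) → List (Int × Int)
  | [] => []
  | g :: gs => (c + 1, c + (g.length : Int)) :: pvRng (c + (g.length : Int)) gs

theorem pvGlue_append (g : List (List Char)) (s : List Char) :
    pvGlue (g ++ [s]) = pvGlue g ++ (s ++ pvNl) := by
  simp [pvGlue]

theorem pvRng_append (c : Int) (gs : List (List (List Char))) (g : List (List Char)) :
    pvRng c (gs ++ [g]) = pvRng c gs ++ [(c + pvCnt gs + 1, c + pvCnt gs + (g.length : Int))] := by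
  induction gs generalizing c with
  | nil => simp [pvRng, pvCnt]
  | cons h t ih =>
    simp only [List.cons_append, pvRng, ih, pvCnt, List.map_cons, List.sum_cons]
    push_cast
    ring_nf

theorem pvCnt_append (gs : List (List (List Char))) (g : List (List Char)) :
    pvCnt (gs ++ [g]) = pvCnt gs + (g.length : Int) := by
  simp [pvCnt]

-- dropping a trailing whitespace-only pvNl does not change rstrip
theorem rstrip_append_nl (x : List Char) :
    PySem.Chars.rstrip (x ++ pvNl) = PySem.Chars.rstrip x := by
  simp [PySem.Chars.rstrip, pvNl, List.dropWhile, PySem.Chars.isspace]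

-- stripping ignores the trailing '\n\n'
theorem strip_append_nl (x : List Char) :
    PySem.Chars.strip (x ++ pvNl) = PySem.Chars.strip x := by
  simp only [PySem.Chars.strip, PySem.Chars.lstrip, List.dropWhile_append]
  by_cases h : List.dropWhile PySem.Chars.isspace x = []
  · simp [h, pvNl, List.dropWhile, PySem.Chars.isspace, PySem.Chars.rstrip]
  · simp [h, rstrip_append_nl]

theorem glue_eq_join (g : List (List Char)) (h : g ≠ []) :
    pvGlue g = PySem.Chars.join pvNl g ++ pvNl := by
  induction g with
  | nil => exact absurd rfl h
  | cons a t ih =>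
    cases t with
    | nil => simp [pvGlue, PySem.Chars.join, List.intercalate]
    | cons b t' =>
      have hrec : pvGlue (b :: t') = PySem.Chars.join pvNl (b :: t') ++ pvNl := ih (by simp)
      have hj : PySem.Chars.join pvNl (a :: b :: t') = a ++ (pvNl ++ PySem.Chars.join pvNl (b :: t')) := by
        simp [PySem.Chars.join, List.intercalate, List.intersperse]
      have hg : pvGlue (a :: b :: t') = a ++ pvNl ++ pvGlue (b :: t') := by simp [pvGlue]
      rw [hg, hrec, hj]
      simp [List.append_assoc]

theorem strip_glue (g : List (List Char)) :
    PySem.Chars.strip (pvGlue g) = PySem.Chars.strip (PySem.Chars.join pvNl g) := by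
  by_cases h : g = []
  · subst h; simp [pvGlue, PySem.Chars.join, List.intercalate]
  · rw [glue_eq_join g h, strip_append_nl]

-- the A-state determined by B's pass-1 state (groups, cur)
def pvAbs (groups : List (List (List Char))) (cur : List (List Char)) :
    List (List Char) × List (Int × Int) × Int × Int × List Char :=
  (groups.map (fun g => PySem.Chars.strip (PySem.Chars.join pvNl g)),
   pvRng 0 groups,
   pvCnt groups + 1,
   pvCnt groups + (cur.length : Int),
   pvGlue cur)

theorem pvGlue_length (cur : List (List Char)) (s : List Char) :
    ((pvGlue (cur ++ [s])).length : Int) = (pvGlue cur).length + s.length + 2 := by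
  rw [pvGlue_append]
  simp [pvNl]
  ring

-- one step commutes: A's loop step on the abstracted state equals the abstraction of B's grouping step
theorem step_commutes (chunk_size : Int) (groups : List (List (List Char))) (cur : List (List Char))
    (s : List Char) :
    ssA_step chunk_size (pvAbs groups cur) s =
      pvAbs (ssB_group chunk_size (groups, cur, ((pvGlue cur).length : Int)) s).1
            (ssB_group chunk_size (groups, cur, ((pvGlue cur).length : Int)) s).2.1 ∧
    (ssB_group chunk_size (groups, cur, ((pvGlue cur).length : Int)) s).2.2 =
      ((pvGlue (ssB_group chunk_size (groups, cur, ((pvGlue cur).length : Int)) s).2.1).length : Int) := by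
  by_cases hc : ((pvGlue cur).length : Int) + (s.length : Int) + 1 ≤ chunk_size
  · refine ⟨?_, ?_⟩
    · simp only [ssA_step, ssB_group, if_pos hc, pvAbs, Prod.mk.injEq]
      refine ⟨trivial, trivial, trivial, by simp only [List.length_append, List.length_cons, List.length_nil]; push_cast; ring, by rw [pvGlue_append]⟩
    · simp only [ssB_group, if_pos hc]
      rw [pvGlue_length]
  · refine ⟨?_, ?_⟩
    · simp only [ssA_step, ssB_group, if_neg hc, pvAbs, Prod.mk.injEq]
      rw [pvRng_append 0 groups cur, pvCnt_append, strip_glue]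
      and_intros <;> try trivial
      · simp
      · norm_num
      · simp [pvGlue]

    · simp only [ssB_group, if_neg hc]
      simp [pvGlue, pvNl]

-- the whole pass-1 fold commutes with abstraction
theorem fold_commutes (chunk_size : Int) (parts : List (List Char)) :
    ∀ (groups : List (List (List Char))) (cur : List (List Char)),
      parts.foldl (ssA_step chunk_size) (pvAbs groups cur) =
        pvAbs (parts.foldl (ssB_group chunk_size) (groups, cur, ((pvGlue cur).length : Int))).1
              (parts.foldl (ssB_group chunk_size) (groups, cur, ((pvGlue cur).length : Int))).2.1 := by
  induction parts with
  | nil => intro groups cur; rfl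
  | cons s rest ih =>
    intro groups cur
    obtain ⟨h1, h2⟩ := step_commutes chunk_size groups cur s
    simp only [List.foldl_cons]
    rw [h1]
    have := ih (ssB_group chunk_size (groups, cur, ((pvGlue cur).length : Int)) s).1
               (ssB_group chunk_size (groups, cur, ((pvGlue cur).length : Int)) s).2.1
    rw [this, ← h2]

-- B's pass-2 fold, characterised
theorem emit_fold (groups : List (List (List Char))) :
    ∀ (arr : List (List Char)) (ranges : List (Int × Int)) (c : Int),
      groups.foldl ssB_emit (arr, ranges, c) =
        (arr ++ groups.map (fun g => PySem.Chars.strip (PySem.Chars.join pvNl g)),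
         ranges ++ pvRng c groups, c + pvCnt groups) := by
  induction groups with
  | nil => intro arr ranges c; simp [pvRng, pvCnt]
  | cons g gs ih =>
    intro arr ranges c
    simp only [List.foldl_cons, ssB_emit, ih, pvRng, pvCnt, List.map_cons, List.sum_cons,
      Prod.mk.injEq]
    refine ⟨by simp, by simp, by push_cast; ring⟩

-- ===== VERDICT (by name: the statement is the Claim_ definition above) =====
theorem split_script_spec : Claim_equal_split_script := by
  intro script_in chunk_size _
  unfold Spec_split_script
  simp only [split_script, split_script_alt]
  have h0 : (([], [], 1, 0, []) : List (List Char) × List (Int × Int) × Int × Int × List Char) =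
      pvAbs [] [] := by simp [pvAbs, pvRng, pvCnt, pvGlue]
  have h1 : (([], [], (0 : Int)) : List (List (List Char)) × List (List Char) × Int) =
      ([], [], ((pvGlue ([] : List (List Char))).length : Int)) := by simp [pvGlue]
  rw [h0, h1, fold_commutes chunk_size _ [] []]
  obtain ⟨groups, cur, curlen⟩ :
      List (List (List Char)) × List (List Char) × Int :=
    (PySem.Chars.splitOn script_in.toList pvNl).foldl (ssB_group chunk_size)
      ([], [], ((pvGlue ([] : List (List Char))).length : Int))
  simp only [pvAbs]
  rw [emit_fold groups [] [] 0]
  simp only [List.nil_append, zero_add, strip_glue]
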